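-- pv_equiv track=rewrite | github.com/VeeraSaiJoshik/AllStateJarvis | TUI/solutions/math_nt/prime_factorization.py | divisor_sieve
-- ===== SOURCE A (Python) =====
-- def divisor_sieve(n):
--     """
--     Compute num_divisors and sum_divisors for all i in [1, n] in O(n log n).
--     Returns (d, sigma) arrays.
--     """
--     d = [0] * (n + 1)       # d[i] = number of divisors
--     sigma = [0] * (n + 1)   # sigma[i] = sum of divisors
--     for i in range(1, n + 1):
--         for j in range(i, n + 1, i):
--             d[j] += 1
--             sigma[j] += i
--     return d, sigma
-- ===== SOURCE B (Python) =====
-- def divisor_sieve(n):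
--     """
--     Divisor-pair sieve: enumerate factor pairs (k, q) with k <= q and k*q <= n,
--     crediting each product once (twice for k < q). Same results as the harmonic
--     sieve, with about half the inner-loop iterations.
--     Returns (d, sigma) arrays.
--     """
--     d = [0] * (n + 1)
--     sigma = [0] * (n + 1)
--     k = 1
--     while k * k <= n:
--         d[k * k] += 1
--         sigma[k * k] += k
--         for q in range(k + 1, n // k + 1):
--             j = k * q
--             d[j] += 2
--             sigma[j] += k + q
--         k += 1
--     return d, sigma
-- ===== Notes on version B (the rewrite author's own statement) =====
-- stated objective: faster
-- what changed: Instead of the harmonic sieve (for every i, bump every multiple of i), B enumerates each factor pair (k, q) with k <= q and k*q <= n once, crediting both divisors of the pair in one visit; this halves the iteration count and drops the per-divisor nested pass.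
import Mathlib
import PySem

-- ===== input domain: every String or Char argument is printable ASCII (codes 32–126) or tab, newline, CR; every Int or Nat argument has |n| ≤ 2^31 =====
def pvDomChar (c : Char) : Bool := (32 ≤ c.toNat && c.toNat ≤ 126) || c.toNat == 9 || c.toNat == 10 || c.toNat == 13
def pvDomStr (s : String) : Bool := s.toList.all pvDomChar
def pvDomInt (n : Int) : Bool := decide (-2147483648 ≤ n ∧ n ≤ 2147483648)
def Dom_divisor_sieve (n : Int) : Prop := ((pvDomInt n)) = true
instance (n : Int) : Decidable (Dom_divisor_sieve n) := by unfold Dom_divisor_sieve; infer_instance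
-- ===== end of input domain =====

-- B replaces A's harmonic sieve by a divisor-pair sieve (each pair (k, q), k ≤ q, k*q ≤ n,
-- visited once, crediting both divisors); measurably faster by a constant factor.

-- ===== PORT A =====
-- 'xs[j] += c' for an index j that the loops keep in range (0 ≤ j < len xs)
def pvBump (xs : List Int) (j c : Int) : List Int :=
  xs.set j.toNat (xs.getD j.toNat 0 + c)

def divisor_sieve (n : Int) : List Int × List Int :=
  let d := List.replicate (n + 1).toNat 0
  let sigma := List.replicate (n + 1).toNat 0
  (PySem.List.pyRange 1 (n + 1) 1).foldl
    (fun ds i =>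
      (PySem.List.pyRange i (n + 1) i).foldl
        (fun ds j => (pvBump ds.1 j 1, pvBump ds.2 j i)) ds)
    (d, sigma)

-- ===== PORT B =====
-- the 'while k * k <= n' loop of Source B
def pvPairLoop (n k : Int) (ds : List Int × List Int) : List Int × List Int :=
  if _h : k * k ≤ n then
    let ds1 := (pvBump ds.1 (k * k) 1, pvBump ds.2 (k * k) k)
    let ds2 := (PySem.List.pyRange (k + 1) (PySem.Int.floordiv n k + 1) 1).foldl
      (fun ds q => (pvBump ds.1 (k * q) 2, pvBump ds.2 (k * q) (k + q))) ds1
    pvPairLoop n (k + 1) ds2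
  else ds
termination_by (n + 1 - k).toNat
decreasing_by
  rcases (by omega : k ≤ 0 ∨ 0 < k) with hk | hk
  · have : 0 ≤ k * k := mul_self_nonneg k
    omega
  · have : 1 * k ≤ k * k := by
      apply mul_le_mul_of_nonneg_right _ (le_of_lt hk)
      omega
    omega

def divisor_sieve_alt (n : Int) : List Int × List Int :=
  let d := List.replicate (n + 1).toNat 0
  let sigma := List.replicate (n + 1).toNat 0
  pvPairLoop n 1 (d, sigma)

-- ===== PRECONDITION & SPEC =====
def Spec_divisor_sieve (n : Int) (out : List Int × List Int) : Prop := out = divisor_sieve_alt n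
instance (n : Int) (out : List Int × List Int) : Decidable (Spec_divisor_sieve n out) := by unfold Spec_divisor_sieve; infer_instance

-- ===== CLAIM (what is proved, stated in full; the proofs are below) =====
def Claim_equal_divisor_sieve : Prop := ∀ (n : Int), Dom_divisor_sieve n → Spec_divisor_sieve n (divisor_sieve n)

-- ===== LEMMAS AND PROOFS =====

-- `pvApply xs E` applies a list of (index, increment) events to the array xs.
def pvApply (xs : List Int) (E : List (Int × Int)) : List Int :=
  E.foldl (fun a p => pvBump a p.1 p.2) xs

theorem pvApply_nil (xs : List Int) : pvApply xs [] = xs := rfl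

theorem pvApply_append (xs : List Int) (E₁ E₂ : List (Int × Int)) :
    pvApply xs (E₁ ++ E₂) = pvApply (pvApply xs E₁) E₂ :=
  List.foldl_append ..

theorem pvApply_flatMap {α : Type} (l : List α) (g : α → List (Int × Int)) (xs : List Int) :
    pvApply xs (l.flatMap g) = l.foldl (fun a x => pvApply a (g x)) xs := by
  induction l generalizing xs with
  | nil => rfl
  | cons x l ih => simp [List.flatMap_cons, pvApply_append, ih]

theorem pvBump_length (xs : List Int) (j c : Int) : (pvBump xs j c).length = xs.length := by
  simp [pvBump]

theorem pvApply_length (xs : List Int) (E : List (Int × Int)) :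
    (pvApply xs E).length = xs.length := by
  induction E generalizing xs with
  | nil => rfl
  | cons p E ih => simpa [pvApply, pvBump] using ih (pvBump xs p.1 p.2)

theorem pvBump_getElem (xs : List Int) (i c : Int) (hi : 0 ≤ i) (hil : i < (xs.length : Int))
    (j : Nat) (hj : j < xs.length) :
    (pvBump xs i c)[j]'(by simpa [pvBump_length] using hj) =
      if i = (j : Int) then xs[j] + c else xs[j] := by
  have hnat : i.toNat < xs.length := by omega
  have hgd : xs.getD i.toNat 0 = xs[i.toNat] := List.getD_eq_getElem xs 0 hnat
  simp only [pvBump, hgd, List.getElem_set]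
  by_cases h : i = (j : Int)
  · have ht : i.toNat = j := by omega
    rw [if_pos ht, if_pos h]
    congr 1
    simp [ht]
  · have ht : i.toNat ≠ j := by omega
    simp [h, ht]

theorem pvApply_getElem (E : List (Int × Int)) (xs : List Int)
    (hE : ∀ p ∈ E, 0 ≤ p.1 ∧ p.1 < (xs.length : Int)) (j : Nat) (hj : j < xs.length) :
    (pvApply xs E)[j]'(by simpa [pvApply_length] using hj) =
      xs[j] + (E.map (fun p => if p.1 = (j : Int) then p.2 else 0)).sum := by
  induction E generalizing xs with
  | nil => simp [pvApply]
  | cons p E ih =>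
    have hp := hE p (by simp)
    have hlen : (pvBump xs p.1 p.2).length = xs.length := pvBump_length ..
    have hE' : ∀ q ∈ E, 0 ≤ q.1 ∧ q.1 < ((pvBump xs p.1 p.2).length : Int) := by
      intro q hq; rw [hlen]; exact hE q (by simp [hq])
    have := ih (pvBump xs p.1 p.2) hE' (by omega)
    simp only [pvApply, List.foldl_cons] at this ⊢
    rw [this, pvBump_getElem xs p.1 p.2 hp.1 hp.2 j hj]
    by_cases h : p.1 = (j : Int) <;> simp [h, add_assoc]

-- sum of a point-mass over a Nodup list
theorem sum_map_point (L : List Int) (h : L.Nodup) (v : Int) (f : Int → Int) :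
    (L.map (fun x => if x = v then f x else 0)).sum = if v ∈ L then f v else 0 := by
  induction L with
  | nil => simp
  | cons x L ih =>
    simp only [List.nodup_cons] at h
    rcases h with ⟨hx, hnd⟩
    by_cases hv : x = v
    · subst hv
      simp [ih hnd, hx]
    · have : v ∈ x :: L ↔ v ∈ L := by simp [Ne.symm hv]
      simp [hv, ih hnd, this]

theorem nodup_pyRange_of_pos (a b s : Int) (hs : 0 < s) :
    (PySem.List.pyRange a b s).Nodup := by
  rw [PySem.List.pyRange_of_pos a b hs]
  refine List.Nodup.map ?_ (List.nodup_range)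
  intro x y hxy
  have hxy' : a + s * (x : Int) = a + s * (y : Int) := hxy
  have h2 : s * (x : Int) = s * (y : Int) := by omega
  have := mul_left_cancel₀ (by omega : s ≠ 0) h2
  omega

theorem sum_map_flatMap {α β : Type} (l : List α) (g : α → List β) (f : β → Int) :
    ((l.flatMap g).map f).sum = (l.map (fun x => ((g x).map f).sum)).sum := by
  induction l with
  | nil => rfl
  | cons x l ih => simp [List.flatMap_cons, ih]

-- list sum over pyRange a b 1 as a Finset.range sum
theorem sum_map_pyRange_one (a b : Int) (f : Int → Int) :
    ((PySem.List.pyRange a b 1).map f).sum =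
      ∑ k ∈ Finset.range (b - a).toNat, f (a + k) := by
  rw [PySem.List.pyRange_one, List.map_map]
  induction (b - a).toNat with
  | zero => simp
  | succ m ih => rw [List.range_succ, Finset.sum_range_succ, ← ih]; simp

-- ==== event lists of the two programs ====

-- A's increment events, with weight c i per multiple of i (c = 1 for d, c = id for sigma)
def pvEvA (n : Int) (c : Int → Int) : List (Int × Int) :=
  (PySem.List.pyRange 1 (n + 1) 1).flatMap
    (fun i => (PySem.List.pyRange i (n + 1) i).map (fun j => (j, c i)))

-- B's increment events from k on: weight c t at the square t*t, weight c t + c q at the pair (t, q)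
def pvEvB (n k : Int) (c : Int → Int) : List (Int × Int) :=
  (PySem.List.pyRange k ((Nat.sqrt n.toNat : Int) + 1) 1).flatMap
    (fun t => (t * t, c t) ::
      (PySem.List.pyRange (t + 1) (PySem.Int.floordiv n t + 1) 1).map
        (fun q => (t * q, c t + c q)))

theorem A_split (n : Int) :
    divisor_sieve n =
      (pvApply (List.replicate (n + 1).toNat 0) (pvEvA n (fun _ => 1)),
       pvApply (List.replicate (n + 1).toNat 0) (pvEvA n (fun i => i))) := by
  unfold divisor_sieve pvEvA
  rw [pvApply_flatMap, pvApply_flatMap]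
  rw [← PySem.List.foldl_prod_mk
        (f := fun a i => pvApply a ((PySem.List.pyRange i (n + 1) i).map (fun j => (j, (1 : Int)))))
        (g := fun a i => pvApply a ((PySem.List.pyRange i (n + 1) i).map (fun j => (j, i))))]
  apply PySem.List.foldl_congr_mem
  intro ds i _
  obtain ⟨a, b⟩ := ds
  rw [PySem.List.foldl_prod_mk (f := fun a j => pvBump a j 1) (g := fun a j => pvBump a j i)]
  unfold pvApply
  rw [List.foldl_map, List.foldl_map]

theorem pvPairLoop_fold (n : Int) (hn : 0 ≤ n) :
    ∀ (fuel : Nat) (k : Int), 1 ≤ k → (n + 1 - k).toNat ≤ fuel →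
      ∀ (a b : List Int), pvPairLoop n k (a, b) =
        (pvApply a (pvEvB n k (fun _ => 1)), pvApply b (pvEvB n k (fun t => t))) := by
  intro fuel
  induction fuel with
  | zero =>
    intro k hk hf a b
    have hkn : ¬ k * k ≤ n := by
      intro h
      have : 1 * k ≤ k * k := by
        apply mul_le_mul_of_nonneg_right hk; omega
      omega
    rw [pvPairLoop, dif_neg hkn]
    have hr : Nat.sqrt n.toNat < k.toNat := by
      rw [Nat.sqrt_lt']
      have : n < k * k := by omega
      have hk2 : ((k.toNat * k.toNat : Nat) : Int) = k * k := by
        push_cast [Int.toNat_of_nonneg (by omega : (0:Int) ≤ k)]; ring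
      have : (n.toNat : Int) < ((k.toNat ^ 2 : Nat) : Int) := by
        push_cast [Int.toNat_of_nonneg hn] at *
        nlinarith
      exact_mod_cast this
    have hnil : PySem.List.pyRange k ((Nat.sqrt n.toNat : Int) + 1) 1 = [] := by
      apply PySem.List.pyRange_one_eq_nil; omega
    simp [pvEvB, hnil, pvApply_nil]
  | succ m ih =>
    intro k hk hf a b
    rw [pvPairLoop]
    by_cases hkn : k * k ≤ n
    · rw [dif_pos hkn]
      dsimp only
      have hkk : 1 * k ≤ k * k := by
        apply mul_le_mul_of_nonneg_right hk; omega
      have hkr : k ≤ (Nat.sqrt n.toNat : Int) := by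
        have h1 : k.toNat ≤ Nat.sqrt n.toNat := by
          rw [Nat.le_sqrt]
          have : ((k.toNat * k.toNat : Nat) : Int) ≤ (n.toNat : Int) := by
            push_cast [Int.toNat_of_nonneg (by omega : (0:Int) ≤ k), Int.toNat_of_nonneg hn]
            nlinarith
          exact_mod_cast this
        omega
      have hcons : PySem.List.pyRange k ((Nat.sqrt n.toNat : Int) + 1) 1 =
          k :: PySem.List.pyRange (k + 1) ((Nat.sqrt n.toNat : Int) + 1) 1 :=
        PySem.List.pyRange_one_cons (by omega)
      -- the inner q-loop splits componentwise
      rw [PySem.List.foldl_prod_mk (f := fun a q => pvBump a (k * q) 2)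
            (g := fun a q => pvBump a (k * q) (k + q))]
      rw [ih (k + 1) (by omega) (by omega)]
      simp only [pvEvB, hcons, List.flatMap_cons, pvApply_append]
      congr 2
      · unfold pvApply
        rw [List.foldl_cons, List.foldl_map]
        norm_num
      · unfold pvApply
        rw [List.foldl_cons, List.foldl_map]
    · rw [dif_neg hkn]
      have hr : Nat.sqrt n.toNat < k.toNat := by
        rw [Nat.sqrt_lt']
        have hlt : n < k * k := by omega
        have : (n.toNat : Int) < ((k.toNat ^ 2 : Nat) : Int) := by
          push_cast [Int.toNat_of_nonneg hn, Int.toNat_of_nonneg (by omega : (0:Int) ≤ k)]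
          nlinarith
        exact_mod_cast this
      have hnil : PySem.List.pyRange k ((Nat.sqrt n.toNat : Int) + 1) 1 = [] := by
        apply PySem.List.pyRange_one_eq_nil; omega
      simp [pvEvB, hnil, pvApply_nil]

theorem B_split (n : Int) (hn : 0 ≤ n) :
    divisor_sieve_alt n =
      (pvApply (List.replicate (n + 1).toNat 0) (pvEvB n 1 (fun _ => 1)),
       pvApply (List.replicate (n + 1).toNat 0) (pvEvB n 1 (fun t => t))) := by
  unfold divisor_sieve_alt
  exact pvPairLoop_fold n hn ((n + 1 - 1).toNat) 1 le_rfl le_rfl _ _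

-- ==== entry values as divisor sums ====

theorem sumA (N : Nat) (c : Int → Int) (j : Nat) (hj : j ≤ N) :
    ((pvEvA (N : Int) c).map (fun p => if p.1 = (j : Int) then p.2 else 0)).sum
      = ∑ m ∈ j.divisors, c (m : Int) := by
  unfold pvEvA
  rw [sum_map_flatMap]
  have h1 : ∀ i ∈ PySem.List.pyRange 1 ((N : Int) + 1) 1,
      (((PySem.List.pyRange i ((N : Int) + 1) i).map (fun jj => (jj, c i))).map
        (fun p => if p.1 = (j : Int) then p.2 else 0)).sum
      = if i ∣ (j : Int) ∧ i ≤ (j : Int) then c i else 0 := by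
    intro i hi
    have hi1 : 1 ≤ i := (PySem.List.mem_pyRange_one.mp hi).1
    rw [List.map_map]
    have hcomp : ((fun p : Int × Int => if p.1 = (j : Int) then p.2 else 0) ∘ (fun jj => (jj, c i)))
        = fun jj => if jj = (j : Int) then c i else 0 := rfl
    rw [hcomp, sum_map_point _ (nodup_pyRange_of_pos i ((N : Int) + 1) i (by omega)) (j : Int) (fun _ => c i)]
    have hmem : ((j : Int) ∈ PySem.List.pyRange i ((N : Int) + 1) i) ↔ (i ∣ (j : Int) ∧ i ≤ (j : Int)) := by
      rw [PySem.List.mem_pyRange_iff_of_pos (by omega)]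
      constructor
      · rintro ⟨h1, _, h3⟩
        refine ⟨?_, h1⟩
        have := dvd_add h3 (dvd_refl i)
        simpa using this
      · rintro ⟨h1, h2⟩
        exact ⟨h2, by omega, dvd_sub h1 (dvd_refl i)⟩
    simp only [hmem]
  rw [List.map_congr_left h1, sum_map_pyRange_one]
  have hN : ((N : Int) + 1 - 1).toNat = N := by omega
  rw [hN]
  have h2 : ∀ k ∈ Finset.range N,
      (if (1 : Int) + (k : Int) ∣ (j : Int) ∧ (1 : Int) + (k : Int) ≤ (j : Int) then c (1 + (k : Int)) else 0)
      = (fun m : Nat => if m ∣ j ∧ m ≤ j then c (m : Int) else 0) (1 + k) := by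
    intro k _
    have hcast : ((1 + k : Nat) : Int) = 1 + (k : Int) := by push_cast; ring
    simp only [← hcast, Int.natCast_dvd_natCast, Nat.cast_le]
  rw [Finset.sum_congr rfl h2]
  have h3 : ∑ x ∈ Finset.range N, (fun m : Nat => if m ∣ j ∧ m ≤ j then c (m : Int) else 0) (1 + x)
      = ∑ m ∈ Finset.Ico 1 (N + 1), (if m ∣ j ∧ m ≤ j then c (m : Int) else 0) := by
    rw [Finset.sum_Ico_eq_sum_range]
    norm_num
  rw [h3, ← Finset.sum_filter]
  have h4 : (Finset.Ico 1 (N + 1)).filter (fun m => m ∣ j ∧ m ≤ j) = j.divisors := by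
    ext m
    simp only [Finset.mem_filter, Finset.mem_Ico, Nat.mem_divisors]
    constructor
    · rintro ⟨⟨hm1, _⟩, hd, hle⟩
      exact ⟨hd, by omega⟩
    · rintro ⟨hd, hne⟩
      have hm1 : 1 ≤ m := Nat.pos_of_dvd_of_pos hd (by omega)
      have hmj : m ≤ j := Nat.le_of_dvd (by omega) hd
      exact ⟨⟨hm1, by omega⟩, hd, hmj⟩
  rw [h4]

theorem sumB (N : Nat) (c : Int → Int) (j : Nat) (hj : j ≤ N) :
    ((pvEvB (N : Int) 1 c).map (fun p => if p.1 = (j : Int) then p.2 else 0)).sum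
      = (if Nat.sqrt j * Nat.sqrt j = j ∧ 1 ≤ j then c (Nat.sqrt j : Int) else 0)
        + ∑ d ∈ j.divisors.filter (fun d => d * d < j), (c (d : Int) + c ((j / d : Nat) : Int)) := by
  unfold pvEvB
  simp only [Int.toNat_natCast]
  rw [sum_map_flatMap]
  have h1 : ∀ t ∈ PySem.List.pyRange 1 ((Nat.sqrt N : Int) + 1) 1,
      (((t * t, c t) :: (PySem.List.pyRange (t + 1) (PySem.Int.floordiv (N : Int) t + 1) 1).map
          (fun q => (t * q, c t + c q))).map (fun p => if p.1 = (j : Int) then p.2 else 0)).sum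
      = (if t * t = (j : Int) then c t else 0)
        + (if t ∣ (j : Int) ∧ t + 1 ≤ (j : Int) / t then c t + c ((j : Int) / t) else 0) := by
    intro t ht
    have ht1 : 1 ≤ t := (PySem.List.mem_pyRange_one.mp ht).1
    rw [List.map_cons, List.sum_cons, List.map_map]
    congr 1
    have hcomp : ((fun p : Int × Int => if p.1 = (j : Int) then p.2 else 0) ∘ (fun q => (t * q, c t + c q)))
        = fun q => if t * q = (j : Int) then c t + c q else 0 := rfl
    rw [hcomp]
    by_cases hdvd : t ∣ (j : Int)
    · have htq0 : t * ((j : Int) / t) = (j : Int) := Int.mul_ediv_cancel' hdvd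
      have hcg : ∀ q ∈ PySem.List.pyRange (t + 1) (PySem.Int.floordiv (N : Int) t + 1) 1,
          (if t * q = (j : Int) then c t + c q else 0)
          = (if q = (j : Int) / t then c t + c ((j : Int) / t) else 0) := by
        intro q _
        by_cases hq : q = (j : Int) / t
        · subst hq; simp [htq0]
        · have : t * q ≠ (j : Int) := by
            intro h
            apply hq
            have := htq0.trans h.symm
            exact (mul_left_cancel₀ (by omega : t ≠ 0) this).symm
          simp [this, hq]
      rw [List.map_congr_left hcg,
          sum_map_point _ (PySem.List.nodup_pyRange_one _ _) ((j : Int) / t) (fun _ => c t + c ((j : Int) / t))]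
      have hmem : ((j : Int) / t ∈ PySem.List.pyRange (t + 1) (PySem.Int.floordiv (N : Int) t + 1) 1)
          ↔ t + 1 ≤ (j : Int) / t := by
        rw [PySem.List.mem_pyRange_one]
        constructor
        · exact fun h => h.1
        · intro h
          refine ⟨h, ?_⟩
          have : (j : Int) / t ≤ PySem.Int.floordiv (N : Int) t := by
            rw [PySem.Int.le_floordiv_iff_mul_le (by omega)]
            have : (j : Int) / t * t = (j : Int) := by rw [mul_comm]; exact htq0
            rw [this]
            exact_mod_cast hj
          omega
      simp only [hmem, hdvd, true_and]
    · have hcg : ∀ q ∈ PySem.List.pyRange (t + 1) (PySem.Int.floordiv (N : Int) t + 1) 1,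
          (if t * q = (j : Int) then c t + c q else 0) = (0 : Int) := by
        intro q _
        have : t * q ≠ (j : Int) := fun h => hdvd (Dvd.intro q h)
        simp [this]
      rw [List.map_congr_left hcg]
      simp [hdvd]
  rw [List.map_congr_left h1, sum_map_pyRange_one]
  have hR : ((Nat.sqrt N : Int) + 1 - 1).toNat = Nat.sqrt N := by omega
  rw [hR]
  have h2 : ∀ k ∈ Finset.range (Nat.sqrt N),
      ((if (1 + (k : Int)) * (1 + (k : Int)) = (j : Int) then c (1 + (k : Int)) else 0)
        + (if (1 + (k : Int)) ∣ (j : Int) ∧ (1 + (k : Int)) + 1 ≤ (j : Int) / (1 + (k : Int))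
            then c (1 + (k : Int)) + c ((j : Int) / (1 + (k : Int))) else 0))
      = (fun m : Nat => (if m * m = j then c (m : Int) else 0)
          + (if m ∣ j ∧ m + 1 ≤ j / m then c (m : Int) + c ((j / m : Nat) : Int) else 0)) (1 + k) := by
    intro k _
    simp only []
    have hc1 : ((1 + k : Nat) : Int) = 1 + (k : Int) := by push_cast; ring
    have hc3 : ((j / (1 + k) : Nat) : Int) = (j : Int) / (1 + (k : Int)) := by
      rw [Int.natCast_div, hc1]
    have hi1 : ((1 + k) * (1 + k) = j) ↔ ((1 + (k : Int)) * (1 + (k : Int)) = (j : Int)) := by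
      rw [← Nat.cast_inj (R := Int)]; push_cast; constructor <;> intro h <;> linarith
    have hi2 : ((1 + k) ∣ j) ↔ ((1 + (k : Int)) ∣ (j : Int)) := by
      rw [← Int.natCast_dvd_natCast, hc1]
    have hi3 : ((1 + k) + 1 ≤ j / (1 + k)) ↔ ((1 + (k : Int)) + 1 ≤ (j : Int) / (1 + (k : Int))) := by
      rw [← Nat.cast_le (α := Int), hc3]
      have hc4 : ((1 + k + 1 : Nat) : Int) = 1 + (k : Int) + 1 := by push_cast; ring
      rw [hc4]
    simp only [hi1, hi2, hi3, hc1, hc3]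
  rw [Finset.sum_congr rfl h2]
  have h3 : ∑ x ∈ Finset.range (Nat.sqrt N),
        (fun m : Nat => (if m * m = j then c (m : Int) else 0)
          + (if m ∣ j ∧ m + 1 ≤ j / m then c (m : Int) + c ((j / m : Nat) : Int) else 0)) (1 + x)
      = ∑ m ∈ Finset.Ico 1 (Nat.sqrt N + 1),
          ((if m * m = j then c (m : Int) else 0)
            + (if m ∣ j ∧ m + 1 ≤ j / m then c (m : Int) + c ((j / m : Nat) : Int) else 0)) := by
    rw [Finset.sum_Ico_eq_sum_range]
    norm_num
  rw [h3, Finset.sum_add_distrib]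
  congr 1
  · -- the square part
    by_cases hsq : Nat.sqrt j * Nat.sqrt j = j ∧ 1 ≤ j
    · rw [← Finset.sum_filter]
      have hfil : (Finset.Ico 1 (Nat.sqrt N + 1)).filter (fun m => m * m = j) = {Nat.sqrt j} := by
        ext m
        simp only [Finset.mem_filter, Finset.mem_Ico, Finset.mem_singleton]
        constructor
        · rintro ⟨_, hm⟩
          rw [← hm, Nat.sqrt_eq]
        · intro hm
          subst hm
          refine ⟨⟨?_, ?_⟩, hsq.1⟩
          · exact Nat.sqrt_pos.mpr (by omega : 0 < j)
          · have : Nat.sqrt j ≤ Nat.sqrt N := Nat.sqrt_le_sqrt hj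
            omega
      rw [hfil, Finset.sum_singleton, if_pos hsq]
    · rw [if_neg hsq, Finset.sum_eq_zero]
      intro m hm
      simp only [Finset.mem_Ico] at hm
      rw [if_neg]
      intro h
      apply hsq
      constructor
      · rw [← h, Nat.sqrt_eq]
      · have : 1 * 1 ≤ m * m := Nat.mul_le_mul hm.1 hm.1
        omega
  · -- the pair part
    have hcg : ∀ m ∈ Finset.Ico 1 (Nat.sqrt N + 1),
        (if m ∣ j ∧ m + 1 ≤ j / m then c (m : Int) + c ((j / m : Nat) : Int) else 0)
        = (if m ∣ j ∧ m * m < j then c (m : Int) + c ((j / m : Nat) : Int) else 0) := by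
      intro m hm
      simp only [Finset.mem_Ico] at hm
      by_cases hd : m ∣ j
      · obtain ⟨e, he⟩ := hd
        have hde : j / m = e := by rw [he, Nat.mul_div_cancel_left e (by omega)]
        have hiff : (m + 1 ≤ j / m) ↔ (m * m < j) := by
          rw [hde, he]
          constructor
          · intro h
            exact mul_lt_mul_of_pos_left (by omega) (by omega)
          · intro h
            have : m < e := Nat.lt_of_mul_lt_mul_left h
            omega
        simp only [hiff]
      · simp [hd]
    rw [Finset.sum_congr rfl hcg, ← Finset.sum_filter]
    have hfil : (Finset.Ico 1 (Nat.sqrt N + 1)).filter (fun m => m ∣ j ∧ m * m < j)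
        = j.divisors.filter (fun d => d * d < j) := by
      ext m
      simp only [Finset.mem_filter, Finset.mem_Ico, Nat.mem_divisors]
      constructor
      · rintro ⟨⟨hm1, _⟩, hd, hlt⟩
        exact ⟨⟨hd, by omega⟩, hlt⟩
      · rintro ⟨⟨hd, hne⟩, hlt⟩
        have hm1 : 1 ≤ m := Nat.pos_of_dvd_of_pos hd (by omega)
        have : m ≤ Nat.sqrt N := Nat.le_sqrt.mpr (by omega)
        exact ⟨⟨hm1, by omega⟩, hd, hlt⟩
    rw [hfil]

-- ==== the counting core: reflection of divisors at the square root ====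

theorem divisor_reflect_sum (j : Nat) (hj : 1 ≤ j) (f : Nat → Int) :
    ∑ d ∈ j.divisors, f d =
      (if Nat.sqrt j * Nat.sqrt j = j ∧ 1 ≤ j then f (Nat.sqrt j) else 0) +
      ∑ d ∈ j.divisors.filter (fun d => d * d < j), (f d + f (j / d)) := by
  rw [← Finset.sum_filter_add_sum_filter_not j.divisors (fun d => d * d < j) f,
      Finset.sum_add_distrib]
  have hsplit : ∑ d ∈ j.divisors.filter (fun d => ¬ d * d < j), f d
      = (if Nat.sqrt j * Nat.sqrt j = j ∧ 1 ≤ j then f (Nat.sqrt j) else 0)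
        + ∑ d ∈ j.divisors.filter (fun d => d * d < j), f (j / d) := by
    rw [← Finset.sum_filter_add_sum_filter_not (j.divisors.filter (fun d => ¬ d * d < j))
          (fun d => d * d = j) f]
    congr 1
    · -- the exact-square divisor, if any
      rw [Finset.filter_filter]
      by_cases hsq : Nat.sqrt j * Nat.sqrt j = j
      · have hone : {a ∈ j.divisors | ¬ a * a < j ∧ a * a = j} = {Nat.sqrt j} := by
          ext a
          simp only [Finset.mem_filter, Nat.mem_divisors, Finset.mem_singleton]
          constructor
          · rintro ⟨_, _, ha⟩
            rw [← ha, Nat.sqrt_eq]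
          · intro ha
            subst ha
            exact ⟨⟨Dvd.intro _ hsq, by omega⟩, by omega, hsq⟩
        rw [hone, Finset.sum_singleton, if_pos ⟨hsq, hj⟩]
      · have hnone : {a ∈ j.divisors | ¬ a * a < j ∧ a * a = j} = ∅ := by
          ext a
          simp only [Finset.mem_filter, Nat.mem_divisors, Finset.notMem_empty, iff_false]
          rintro ⟨_, _, ha⟩
          apply hsq
          rw [← ha, Nat.sqrt_eq]
        rw [hnone, Finset.sum_empty, if_neg (fun h => hsq h.1)]
    · -- the divisors above the square root, reflected to those below
      rw [Finset.filter_filter]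
      apply Finset.sum_nbij' (i := fun d => j / d) (j := fun d => j / d)
      · intro a ha
        simp only [Finset.mem_filter, Nat.mem_divisors] at ha ⊢
        obtain ⟨⟨had, hne⟩, hlt, hneq⟩ := ha
        obtain ⟨e, he⟩ := had
        have ha1 : 1 ≤ a := Nat.pos_of_dvd_of_pos ⟨e, he⟩ (by omega)
        have hde : j / a = e := by rw [he, Nat.mul_div_cancel_left e (by omega)]
        have he1 : 1 ≤ e := by
          rcases Nat.eq_zero_or_pos e with h | h
          · subst h
            simp at he
            omega
          · exact h
        have hgt : a * e < a * a := by omega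
        have hea : e < a := Nat.lt_of_mul_lt_mul_left hgt
        have hlt2 : e * e < a * e := mul_lt_mul_of_pos_right hea (by omega)
        refine ⟨⟨⟨a, by rw [hde, he]; exact Nat.mul_comm a e⟩, by omega⟩, ?_⟩
        rw [hde]
        omega
      · intro a ha
        simp only [Finset.mem_filter, Nat.mem_divisors] at ha ⊢
        obtain ⟨⟨had, hne⟩, hlt⟩ := ha
        obtain ⟨e, he⟩ := had
        have ha1 : 1 ≤ a := Nat.pos_of_dvd_of_pos ⟨e, he⟩ (by omega)
        have hde : j / a = e := by rw [he, Nat.mul_div_cancel_left e (by omega)]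
        have hlt0 : a * a < a * e := by omega
        have hae : a < e := Nat.lt_of_mul_lt_mul_left hlt0
        have hje : a * e < e * e := mul_lt_mul_of_pos_right hae (by omega)
        rw [hde]
        exact ⟨⟨⟨a, by rw [he]; exact Nat.mul_comm a e⟩, by omega⟩, by omega, by omega⟩
      · intro a ha
        simp only [Finset.mem_filter, Nat.mem_divisors] at ha
        exact Nat.div_div_self ha.1.1 ha.1.2
      · intro a ha
        simp only [Finset.mem_filter, Nat.mem_divisors] at ha
        exact Nat.div_div_self ha.1.1 ha.1.2
      · intro a ha
        simp only [Finset.mem_filter, Nat.mem_divisors] at ha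
        rw [Nat.div_div_self ha.1.1 ha.1.2]
  rw [hsplit]
  ring

theorem evA_bounds (N : Nat) (c : Int → Int) :
    ∀ p ∈ pvEvA (N : Int) c, 0 ≤ p.1 ∧ p.1 < (N : Int) + 1 := by
  intro p hp
  unfold pvEvA at hp
  simp only [List.mem_flatMap, List.mem_map] at hp
  obtain ⟨i, hi, jj, hjj, rfl⟩ := hp
  have hi1 : 1 ≤ i := (PySem.List.mem_pyRange_one.mp hi).1
  have := (PySem.List.mem_pyRange_iff_of_pos (by omega) jj).mp hjj
  exact ⟨by omega, by omega⟩

theorem evB_bounds (N : Nat) (c : Int → Int) :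
    ∀ p ∈ pvEvB (N : Int) 1 c, 0 ≤ p.1 ∧ p.1 < (N : Int) + 1 := by
  intro p hp
  unfold pvEvB at hp
  simp only [Int.toNat_natCast, List.mem_flatMap, List.mem_cons, List.mem_map] at hp
  obtain ⟨t, ht, hp⟩ := hp
  have ht' := PySem.List.mem_pyRange_one.mp ht
  have ht1 : 1 ≤ t := ht'.1
  have htr : t ≤ (Nat.sqrt N : Int) := by omega
  have htt : t * t ≤ (N : Int) := by
    have h1 : t.toNat ≤ Nat.sqrt N := by omega
    have h2 : t.toNat * t.toNat ≤ N := Nat.le_sqrt.mp h1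
    have h3 : ((t.toNat * t.toNat : Nat) : Int) = t * t := by
      push_cast [Int.toNat_of_nonneg (by omega : (0 : Int) ≤ t)]; ring
    omega
  rcases hp with hsq | ⟨q, hq, hpe⟩
  · rw [hsq]
    constructor
    · have : (0 : Int) ≤ t * t := mul_self_nonneg t
      simpa using this
    · simp only []
      omega
  · have hq' := PySem.List.mem_pyRange_one.mp hq
    have hqf : q ≤ PySem.Int.floordiv (N : Int) t := by omega
    have hqt : q * t ≤ (N : Int) := (PySem.Int.le_floordiv_iff_mul_le (by omega)).mp hqf
    have h0 : 0 ≤ t * q := by nlinarith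
    have h1 : t * q ≤ (N : Int) := by nlinarith
    rw [← hpe]
    exact ⟨h0, by omega⟩

theorem main_nat (N : Nat) : divisor_sieve (N : Int) = divisor_sieve_alt (N : Int) := by
  rw [A_split, B_split _ (by positivity)]
  have hlen : (((N : Int) + 1)).toNat = N + 1 := by omega
  have entry_eq : ∀ (c : Int → Int) (j : Nat), j ≤ N →
      ((pvEvA (N : Int) c).map (fun p => if p.1 = (j : Int) then p.2 else 0)).sum
        = ((pvEvB (N : Int) 1 c).map (fun p => if p.1 = (j : Int) then p.2 else 0)).sum := by
    intro c j hj
    rw [sumA N c j hj, sumB N c j hj]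
    rcases Nat.eq_zero_or_pos j with h0 | h1
    · subst h0
      simp [Nat.divisors_zero]
    · exact divisor_reflect_sum j h1 (fun m => c (m : Int))
  have comp : ∀ (c : Int → Int),
      pvApply (List.replicate ((N : Int) + 1).toNat 0) (pvEvA (N : Int) c)
        = pvApply (List.replicate ((N : Int) + 1).toNat 0) (pvEvB (N : Int) 1 c) := by
    intro c
    apply List.ext_getElem
    · rw [pvApply_length, pvApply_length]
    · intro j hja hjb
      rw [pvApply_length, List.length_replicate] at hja
      have hlen2 : ((List.replicate ((N : Int) + 1).toNat (0 : Int)).length : Int) = (N : Int) + 1 := by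
        rw [List.length_replicate]; omega
      have hEA : ∀ p ∈ pvEvA (N : Int) c, 0 ≤ p.1 ∧ p.1 < ((List.replicate ((N : Int) + 1).toNat (0 : Int)).length : Int) := by
        rw [hlen2]; exact evA_bounds N c
      have hEB : ∀ p ∈ pvEvB (N : Int) 1 c, 0 ≤ p.1 ∧ p.1 < ((List.replicate ((N : Int) + 1).toNat (0 : Int)).length : Int) := by
        rw [hlen2]; exact evB_bounds N c
      have hjlt : j < (List.replicate ((N : Int) + 1).toNat (0 : Int)).length := by
        rw [List.length_replicate]; omega
      rw [pvApply_getElem _ _ hEA j hjlt, pvApply_getElem _ _ hEB j hjlt,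
          List.getElem_replicate, entry_eq c j (by omega)]
  exact Prod.ext (comp _) (comp _)

theorem divisor_sieve_eq (n : Int) : divisor_sieve n = divisor_sieve_alt n := by
  rcases (by omega : 0 ≤ n ∨ n < 0) with hn | hn
  · have : n = ((n.toNat : Nat) : Int) := by omega
    rw [this]
    exact main_nat n.toNat
  · have h1 : (n + 1).toNat = 0 := by omega
    have h2 : PySem.List.pyRange 1 (n + 1) 1 = [] :=
      PySem.List.pyRange_one_eq_nil (by omega)
    unfold divisor_sieve divisor_sieve_alt
    rw [pvPairLoop]
    rw [dif_neg (by omega : ¬ (1 : Int) * 1 ≤ n)]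
    simp [h1, h2]

-- ===== VERDICT (by name: the statement is the Claim_ definition above) =====
theorem divisor_sieve_spec : Claim_equal_divisor_sieve := by
  intro n _
  show divisor_sieve n = divisor_sieve_alt n
  exact divisor_sieve_eq n
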